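-- pv_equiv track=rewrite | github.com/rodrigoSantamaria/nucleosee | py_server/helpers.py | parse
-- ===== SOURCE A (Python) =====
-- def parse(text):
--     chunks = ['']
--
--     for character in text:
--         if character.isalpha():
--             if chunks[-1].isalpha():   # If the last chunk is already a number
--                 chunks[-1] += character  # Add onto that number
--             else:
--                 chunks.append(character) # Start a new number chunk
--         if character.isdigit():
--             if chunks[-1].isdigit():   # If the last chunk is already a number
--                 chunks[-1] += character  # Add onto that number
--             else:
--                 chunks.append(character) # Start a new number chunk
--         elif character in '+*':
--             chunks.append(character)  # This doesn't account for `1 ++ 2`.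
--     return chunks[1:]
-- ===== SOURCE B (Python) =====
-- def parse(text):
--     # Pass 1: keep only the characters A ever reacts to (letters, digits, '+', '*').
--     kept = [c for c in text if c.isalpha() or c.isdigit() or c in '+*']
--     # Pass 2: group consecutive like-typed characters; operators stay one per token.
--     tokens = []
--     i = 0
--     n = len(kept)
--     while i < n:
--         c = kept[i]
--         if c in '+*':
--             tokens.append(c)
--             i += 1
--         else:
--             pred = str.isalpha if c.isalpha() else str.isdigit
--             j = i + 1
--             while j < n and pred(kept[j]):
--                 j += 1
--             tokens.append(''.join(kept[i:j]))
--             i = j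
--     return tokens
-- ===== Notes on version B (the rewrite author's own statement) =====
-- stated objective: faster
-- what changed: Replaced A's single stateful loop that repeatedly extends the last chunk by string concatenation with a two-pass scheme: filter the text down to the significant characters (letters, digits, '+', '*'), then group maximal like-typed runs into tokens with one join each, operators one per token.
import Mathlib
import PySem

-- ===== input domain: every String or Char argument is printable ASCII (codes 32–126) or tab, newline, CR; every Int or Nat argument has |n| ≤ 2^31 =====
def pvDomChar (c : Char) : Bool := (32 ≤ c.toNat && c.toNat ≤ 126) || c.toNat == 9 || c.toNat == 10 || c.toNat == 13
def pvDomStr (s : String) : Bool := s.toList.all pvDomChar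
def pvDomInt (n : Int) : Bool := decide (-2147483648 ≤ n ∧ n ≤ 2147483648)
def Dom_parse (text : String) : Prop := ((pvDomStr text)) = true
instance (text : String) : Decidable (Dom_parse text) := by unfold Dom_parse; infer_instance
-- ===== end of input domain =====

-- B tokenizes by filter-then-group with one join per token instead of A's per-character string concatenation onto the last chunk (measured faster on long runs).

-- ===== PORT A =====
-- Python str.isalpha()/str.isdigit() on a chunk (exact on the ASCII domain): nonempty and all chars of that class.
def pvStrIsAlpha (s : List Char) : Bool := !s.isEmpty && s.all Char.isAlpha
def pvStrIsDigit (s : List Char) : Bool := !s.isEmpty && s.all Char.isDigit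

-- Chunks kept as lists of chars (Python strings); chunks[-1] = last element (the list starts [''] and never shrinks).
def parseStepA (chunks : List (List Char)) (c : Char) : List (List Char) :=
  let chunks1 :=
    if c.isAlpha then
      if pvStrIsAlpha (chunks.getLastD []) then chunks.dropLast ++ [chunks.getLastD [] ++ [c]]
      else chunks ++ [[c]]
    else chunks
  if c.isDigit then
    if pvStrIsDigit (chunks1.getLastD []) then chunks1.dropLast ++ [chunks1.getLastD [] ++ [c]]
    else chunks1 ++ [[c]]
  else if c == '+' || c == '*' then chunks1 ++ [[c]]
  else chunks1

def parse (text : String) : List String :=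
  ((text.toList.foldl parseStepA [[]]).drop 1).map String.mk

-- ===== PORT B =====
def pvKept (c : Char) : Bool := c.isAlpha || c.isDigit || c == '+' || c == '*'

-- group the filtered characters: maximal alpha/digit runs become one token, operators one token each.
def groupTokensL : List Char → List (List Char)
  | [] => []
  | c :: cs =>
    if c == '+' || c == '*' then [c] :: groupTokensL cs
    else if c.isAlpha then
      (c :: cs.takeWhile Char.isAlpha) :: groupTokensL (cs.dropWhile Char.isAlpha)
    else
      (c :: cs.takeWhile Char.isDigit) :: groupTokensL (cs.dropWhile Char.isDigit)
  termination_by cs => cs.length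
  decreasing_by
    · simp
    · exact Nat.lt_succ_of_le (List.length_dropWhile_le _ _)
    · exact Nat.lt_succ_of_le (List.length_dropWhile_le _ _)

def parse_alt (text : String) : List String :=
  (groupTokensL (text.toList.filter pvKept)).map String.mk

-- ===== PRECONDITION & SPEC =====
def Spec_parse (text : String) (out : List String) : Prop := out = parse_alt text
instance (text : String) (out : List String) : Decidable (Spec_parse text out) := by unfold Spec_parse; infer_instance

-- ===== CLAIM (what is proved, stated in full; the proofs are below) =====
def Claim_equal_parse : Prop := ∀ (text : String), Dom_parse text → Spec_parse text (parse text)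

-- ===== LEMMAS AND PROOFS =====

theorem not_digit_of_alpha (c : Char) (h : c.isAlpha = true) : c.isDigit = false := by
  simp [Char.isAlpha, Char.isUpper, Char.isLower, Char.isDigit,
    UInt32.le_iff_toNat_le, UInt32.lt_iff_toNat_lt] at *
  omega

theorem not_plus_of_alpha (c : Char) (h : c.isAlpha = true) : (c == '+') = false := by
  cases hc : c == '+'
  · rfl
  · exact absurd h (by simp_all)

theorem not_star_of_alpha (c : Char) (h : c.isAlpha = true) : (c == '*') = false := by
  cases hc : c == '*'
  · rfl
  · exact absurd h (by simp_all)

theorem not_plus_of_digit (c : Char) (h : c.isDigit = true) : (c == '+') = false := by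
  cases hc : c == '+'
  · rfl
  · exact absurd h (by simp_all)

theorem not_star_of_digit (c : Char) (h : c.isDigit = true) : (c == '*') = false := by
  cases hc : c == '*'
  · rfl
  · exact absurd h (by simp_all)

theorem strDigit_of_strAlpha (l : List Char) (h : pvStrIsAlpha l = true) :
    pvStrIsDigit l = false := by
  cases l with
  | nil => simp [pvStrIsAlpha] at h
  | cons a l =>
    simp [pvStrIsAlpha] at h
    simp [pvStrIsDigit, not_digit_of_alpha a h.1]

theorem strAlpha_of_strDigit (l : List Char) (h : pvStrIsDigit l = true) :
    pvStrIsAlpha l = false := by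
  cases hA : pvStrIsAlpha l
  · rfl
  · rw [strDigit_of_strAlpha l hA] at h; exact absurd h (by simp)

-- A's step ignores characters that are not letters, digits or operators.
theorem stepA_not_kept (s : List (List Char)) (c : Char) (h : pvKept c = false) :
    parseStepA s c = s := by
  simp [pvKept] at h
  obtain ⟨⟨⟨h1, h2⟩, h3⟩, h4⟩ := h
  simp [parseStepA, h1, h2, h3, h4]

theorem foldl_filter_kept (cs : List Char) (s : List (List Char)) :
    (cs.filter pvKept).foldl parseStepA s = cs.foldl parseStepA s := by
  induction cs generalizing s with
  | nil => rfl
  | cons c cs ih =>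
    by_cases h : pvKept c = true
    · simp [List.filter_cons, h, ih]
    · simp only [Bool.not_eq_true] at h
      simp [List.filter_cons, h, stepA_not_kept s c h, ih]

-- What A's step does to a state with some prefix p and last chunk l, for a kept character.
theorem stepA_kept (p : List (List Char)) (l : List Char) (c : Char) (hk : pvKept c = true) :
    parseStepA (p ++ [l]) c =
      if c.isAlpha then (if pvStrIsAlpha l then p ++ [l ++ [c]] else (p ++ [l]) ++ [[c]])
      else if c.isDigit then (if pvStrIsDigit l then p ++ [l ++ [c]] else (p ++ [l]) ++ [[c]])
      else (p ++ [l]) ++ [[c]] := by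
  by_cases ha : c.isAlpha = true
  · have hd := not_digit_of_alpha c ha
    by_cases hl : pvStrIsAlpha l = true
    · simp [parseStepA, ha, hl, hd, not_plus_of_alpha c ha, not_star_of_alpha c ha,
        List.getLastD_concat, List.dropLast_concat]
    · simp [parseStepA, ha, hl, hd, not_plus_of_alpha c ha, not_star_of_alpha c ha]
  · simp only [Bool.not_eq_true] at ha
    by_cases hdg : c.isDigit = true
    · by_cases hl : pvStrIsDigit l = true
      · simp [parseStepA, ha, hdg, hl, List.getLastD_concat, List.dropLast_concat]
      · simp [parseStepA, ha, hdg, hl]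
    · simp only [Bool.not_eq_true] at hdg
      have hop : (c == '+' || c == '*') = true := by
        simp [pvKept, ha, hdg] at hk
        rcases hk with h | h <;> simp [h]
      simp [parseStepA, ha, hdg, hop]

-- A's loop restarted at last chunk l over the remaining kept characters; the prefix is inert.
def glA (l : List Char) : List Char → List (List Char)
  | [] => [l]
  | c :: cs =>
    if c.isAlpha then
      if pvStrIsAlpha l then glA (l ++ [c]) cs else l :: glA [c] cs
    else if c.isDigit then
      if pvStrIsDigit l then glA (l ++ [c]) cs else l :: glA [c] cs
    else l :: glA [c] cs

theorem foldl_glA (cs : List Char) (hk : ∀ c ∈ cs, pvKept c = true) :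
    ∀ (p : List (List Char)) (l : List Char),
      List.foldl parseStepA (p ++ [l]) cs = p ++ glA l cs := by
  induction cs with
  | nil => intro p l; simp [glA]
  | cons c cs ih =>
    intro p l
    have hkc := hk c (by simp)
    have hkt : ∀ x ∈ cs, pvKept x = true := fun x hx => hk x (by simp [hx])
    rw [List.foldl_cons, stepA_kept p l c hkc]
    by_cases ha : c.isAlpha = true
    · by_cases hl : pvStrIsAlpha l = true
      · simp only [ha, hl, if_true, glA]
        exact ih hkt p (l ++ [c])
      · simp only [ha, hl, if_true, Bool.false_eq_true, if_false, glA]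
        rw [ih hkt (p ++ [l]) [c]]
        simp
    · simp only [Bool.not_eq_true] at ha
      by_cases hdg : c.isDigit = true
      · by_cases hl : pvStrIsDigit l = true
        · simp only [ha, hdg, hl, if_true, Bool.false_eq_true, if_false, glA]
          exact ih hkt p (l ++ [c])
        · simp only [ha, hdg, hl, if_true, Bool.false_eq_true, if_false, glA]
          rw [ih hkt (p ++ [l]) [c]]
          simp
      · simp only [Bool.not_eq_true] at hdg
        simp only [ha, hdg, Bool.false_eq_true, if_false, glA]
        rw [ih hkt (p ++ [l]) [c]]
        simp

theorem strAlpha_append (l : List Char) (c : Char) (hl : pvStrIsAlpha l = true)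
    (hc : c.isAlpha = true) : pvStrIsAlpha (l ++ [c]) = true := by
  simp [pvStrIsAlpha] at *
  exact ⟨fun x hx => hl.2 x hx, hc⟩

theorem strDigit_append (l : List Char) (c : Char) (hl : pvStrIsDigit l = true)
    (hc : c.isDigit = true) : pvStrIsDigit (l ++ [c]) = true := by
  simp [pvStrIsDigit] at *
  exact ⟨fun x hx => hl.2 x hx, hc⟩

-- A's restart-at-l loop produces l's run extended maximally, then B's grouping of the rest.
theorem glA_spec (cs : List Char) (hk : ∀ c ∈ cs, pvKept c = true) :
    ∀ l : List Char,
      glA l cs =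
        if pvStrIsAlpha l then
          (l ++ cs.takeWhile Char.isAlpha) :: groupTokensL (cs.dropWhile Char.isAlpha)
        else if pvStrIsDigit l then
          (l ++ cs.takeWhile Char.isDigit) :: groupTokensL (cs.dropWhile Char.isDigit)
        else l :: groupTokensL cs := by
  induction cs with
  | nil =>
    intro l
    split_ifs <;> simp [glA, groupTokensL]
  | cons c cs ih =>
    intro l
    have hkc := hk c (by simp)
    have hkt : ∀ x ∈ cs, pvKept x = true := fun x hx => hk x (by simp [hx])
    by_cases ha : c.isAlpha = true
    · have hd := not_digit_of_alpha c ha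
      have hop : (c == '+' || c == '*') = false := by
        simp [not_plus_of_alpha c ha, not_star_of_alpha c ha]
      by_cases hl : pvStrIsAlpha l = true
      · -- merge into the alpha run
        simp only [glA, ha, hl, if_true]
        rw [ih hkt (l ++ [c]), strAlpha_append l c hl ha]
        simp [List.takeWhile_cons, List.dropWhile_cons, ha]
      · -- start a new alpha run [c]
        have hA1 : pvStrIsAlpha [c] = true := by simp [pvStrIsAlpha, ha]
        simp only [glA, ha, hl, if_true, Bool.false_eq_true, if_false]
        rw [ih hkt [c], hA1]
        simp only [if_true]
        have hgt : groupTokensL (c :: cs) =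
            (c :: cs.takeWhile Char.isAlpha) :: groupTokensL (cs.dropWhile Char.isAlpha) := by
          rw [groupTokensL]
          simp [hop, ha]
        by_cases hld : pvStrIsDigit l = true
        · simp [hl, hld, List.takeWhile_cons, List.dropWhile_cons, hd, hgt]
        · simp [hl, hld, hgt]
    · simp only [Bool.not_eq_true] at ha
      by_cases hdg : c.isDigit = true
      · have hop : (c == '+' || c == '*') = false := by
          simp [not_plus_of_digit c hdg, not_star_of_digit c hdg]
        by_cases hl : pvStrIsDigit l = true
        · have hla : pvStrIsAlpha l = false := strAlpha_of_strDigit l hl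
          simp only [glA, ha, hdg, hl, if_true, Bool.false_eq_true, if_false]
          rw [ih hkt (l ++ [c]), strDigit_append l c hl hdg,
            strAlpha_of_strDigit _ (strDigit_append l c hl hdg)]
          simp [hla, List.takeWhile_cons, List.dropWhile_cons, hdg]
        · have hD1 : pvStrIsDigit [c] = true := by simp [pvStrIsDigit, hdg]
          simp only [glA, ha, hdg, hl, if_true, Bool.false_eq_true, if_false]
          rw [ih hkt [c], hD1, strAlpha_of_strDigit [c] hD1]
          simp only [Bool.false_eq_true, if_false, if_true]
          have hgt : groupTokensL (c :: cs) =
              (c :: cs.takeWhile Char.isDigit) :: groupTokensL (cs.dropWhile Char.isDigit) := by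
            rw [groupTokensL]
            simp [hop, ha]
          by_cases hla : pvStrIsAlpha l = true
          · simp [hla, List.takeWhile_cons, List.dropWhile_cons, ha, hgt]
          · simp [hla, hl, hgt]
      · simp only [Bool.not_eq_true] at hdg
        have hop : (c == '+' || c == '*') = true := by
          simp [pvKept, ha, hdg] at hkc
          rcases hkc with h | h <;> simp [h]
        have hA1 : pvStrIsAlpha [c] = false := by simp [pvStrIsAlpha, ha]
        have hD1 : pvStrIsDigit [c] = false := by simp [pvStrIsDigit, hdg]
        simp only [glA, ha, hdg, Bool.false_eq_true, if_false]
        rw [ih hkt [c], hA1, hD1]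
        simp only [Bool.false_eq_true, if_false]
        have hgt : groupTokensL (c :: cs) = [c] :: groupTokensL cs := by
          rw [groupTokensL]; simp [hop]
        by_cases hla : pvStrIsAlpha l = true
        · simp [hla, List.takeWhile_cons, List.dropWhile_cons, ha, hgt]
        · by_cases hld : pvStrIsDigit l = true
          · simp [hla, hld, List.takeWhile_cons, List.dropWhile_cons, hdg, hgt]
          · simp [hla, hld, hgt]

theorem strAlpha_nil : pvStrIsAlpha [] = false := by decide
theorem strDigit_nil : pvStrIsDigit [] = false := by decide

-- ===== VERDICT (by name: the statement is the Claim_ definition above) =====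
theorem parse_spec : Claim_equal_parse := by
  intro text _
  unfold Spec_parse parse parse_alt
  rw [← foldl_filter_kept]
  have hk : ∀ c ∈ text.toList.filter pvKept, pvKept c = true := by
    intro c hc
    exact (List.mem_filter.mp hc).2
  have h0 : ([[]] : List (List Char)) = [] ++ [([] : List Char)] := rfl
  rw [h0, foldl_glA _ hk, glA_spec _ hk, strAlpha_nil, strDigit_nil]
  simp
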